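-- pv_equiv track=rewrite | github.com/dzolotusky/advent-of-code | 2021/17/17.py | y_at_time
-- ===== SOURCE A (Python) =====
-- y_cache = {}
--
-- def y_at_time(t, y_velocity):
--     if (t, y_velocity) in y_cache:
--         return y_cache[(t, y_velocity)]
--
--     cur_y = 0
--     cur_velocity = y_velocity
--     for cur_t in range(t):
--         cur_y += cur_velocity
--         cur_velocity -= 1
--
--     y_cache[(t, y_velocity)] = cur_y
--     return cur_y
-- ===== SOURCE B (Python) =====
-- def y_at_time(t, y_velocity):
--     if t <= 0:
--         return 0
--     return t * y_velocity - t * (t - 1) // 2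
-- ===== Notes on version B (the rewrite author's own statement) =====
-- stated objective: faster
-- what changed: Replaced the O(t) simulation loop by the closed-form arithmetic-series formula t*v - t*(t-1)//2.
import Mathlib
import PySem

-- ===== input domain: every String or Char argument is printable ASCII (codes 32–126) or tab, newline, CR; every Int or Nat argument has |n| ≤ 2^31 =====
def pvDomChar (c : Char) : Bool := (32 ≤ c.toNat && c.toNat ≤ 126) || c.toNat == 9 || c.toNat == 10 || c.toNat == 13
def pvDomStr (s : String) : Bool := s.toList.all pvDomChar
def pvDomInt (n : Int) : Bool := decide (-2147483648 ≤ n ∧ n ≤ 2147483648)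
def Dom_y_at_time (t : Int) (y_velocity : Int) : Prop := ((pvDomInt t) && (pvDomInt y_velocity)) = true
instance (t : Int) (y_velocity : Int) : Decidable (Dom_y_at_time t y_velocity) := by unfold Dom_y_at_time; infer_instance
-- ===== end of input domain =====

-- B replaces A's O(t) step-by-step simulation loop with the closed-form arithmetic-series
-- formula t*v - t*(t-1)//2 (A's y_cache memoisation never changes the returned value, so
-- the equivalence is about the return value; B keeps no cache).

-- ===== PORT A =====
-- A's loop: for cur_t in range(t): cur_y += cur_velocity; cur_velocity -= 1
def y_at_time (t : Int) (y_velocity : Int) : Int :=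
  let s := (PySem.List.pyRange 0 t 1).foldl
    (fun (s : Int × Int) _ => (s.1 + s.2, s.2 - 1)) (0, y_velocity)
  s.1

-- ===== PORT B =====
def y_at_time_alt (t : Int) (y_velocity : Int) : Int :=
  if t ≤ 0 then 0
  else t * y_velocity - PySem.Int.floordiv (t * (t - 1)) 2

-- ===== PRECONDITION & SPEC =====
def Spec_y_at_time (t : Int) (y_velocity : Int) (out : Int) : Prop := out = y_at_time_alt t y_velocity
instance (t : Int) (y_velocity : Int) (out : Int) : Decidable (Spec_y_at_time t y_velocity out) := by unfold Spec_y_at_time; infer_instance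

-- ===== CLAIM (what is proved, stated in full; the proofs are below) =====
def Claim_equal_y_at_time : Prop := ∀ (t : Int) (y_velocity : Int), Dom_y_at_time t y_velocity → Spec_y_at_time t y_velocity (y_at_time t y_velocity)

-- ===== LEMMAS AND PROOFS =====

-- loop invariant: after n steps, velocity is v - n and 2*y = 2*n*v - n*(n-1)
theorem y_at_time_loop (n : Nat) (y v : Int) :
    (PySem.List.pyRange 0 n 1).foldl
      (fun (s : Int × Int) _ => (s.1 + s.2, s.2 - 1)) (y, v)
    = (y + n * v - n * (n - 1) / 2, v - n) := by
  induction n generalizing y v with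
  | zero => simp
  | succ n ih =>
    have h : (PySem.List.pyRange 0 ((n : Int) + 1) 1)
        = PySem.List.pyRange 0 (n : Int) 1 ++ [(n : Int)] :=
      PySem.List.pyRange_one_succ_right (by positivity)
    push_cast
    rw [h, List.foldl_append, ih]
    simp only [List.foldl_cons, List.foldl_nil, Prod.mk.injEq]
    constructor
    · have h2 : (n : Int) * ((n : Int) - 1) % 2 = 0 := by
        obtain ⟨k, hk⟩ := Int.even_mul_succ_self ((n : Int) - 1)
        have hk' : (n : Int) * ((n : Int) - 1) = k + k := by rw [← hk]; ring
        omega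
      have h5 : ((n : Int) + 1) * ((n : Int) + 1 - 1) = (n : Int) * ((n : Int) - 1) + 2 * n := by
        ring
      have hv : ((n : Int) + 1) * v = (n : Int) * v + v := by ring
      rw [h5, hv]
      generalize (n : Int) * ((n : Int) - 1) = m at *
      generalize (n : Int) * v = q
      omega
    · ring

theorem y_at_time_spec' (t : Int) (y_velocity : Int) :
    y_at_time t y_velocity = y_at_time_alt t y_velocity := by
  unfold y_at_time y_at_time_alt
  rcases le_or_gt t 0 with ht | ht
  · rw [PySem.List.pyRange_one_eq_nil ht]
    simp [ht]
  · have hn : t = ((t.toNat : Nat) : Int) := by omega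
    rw [if_neg (by omega), PySem.Int.floordiv_eq_ediv_of_pos (by norm_num)]
    rw [hn, y_at_time_loop]
    simp

-- ===== VERDICT (by name: the statement is the Claim_ definition above) =====
theorem y_at_time_spec : Claim_equal_y_at_time := by
  intro t v _
  unfold Spec_y_at_time
  exact y_at_time_spec' t v
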